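-- pv_equiv track=rewrite | github.com/undisputeDD/IR | DIndex_CIndex/src/search.py | process
-- ===== SOURCE A (Python) =====
-- def process(sp_query):
--     res = []
--     counter = 0
--     for i in range(len(sp_query)):
--         elem = sp_query[i]
--         if elem != 'AND' and elem != 'OR' and elem != 'NOT' and elem != '(' and elem != ')':
--             counter += 1
--         else:
--             counter = 0
--         if counter == 3:
--             res.append('AND')
--             res.append(res[len(res) - 2])
--             counter = 2
--         res.append(elem)
--     ans = []
--     pair = ''
--     for elem in res:
--         if elem == 'AND' or elem == 'OR' or elem == 'NOT' or elem == '(' or elem == ')':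
--             ans.append(elem)
--         else:
--             if len(pair) != 0:
--                 pair += elem
--                 ans.append(pair)
--                 pair = ''
--             else:
--                 pair = elem + ' '
--     return ans
-- ===== SOURCE B (Python) =====
-- OPS = ('AND', 'OR', 'NOT', '(', ')')
--
-- def process(sp_query):
--     # Single fused pass: no intermediate token stream is materialized.
--     ans = []
--     pair = ''
--     counter = 0
--     last = ''  # most recent non-operator token fed to the pairing stage
--
--     def feed_word(w):
--         nonlocal pair, last
--         if pair:
--             ans.append(pair + w)
--             pair = ''
--         else:
--             pair = w + ' '
--         last = w
--
--     for elem in sp_query: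
--         if elem in OPS:
--             counter = 0
--             ans.append(elem)
--         else:
--             counter += 1
--             if counter == 3:
--                 ans.append('AND')
--                 feed_word(last)
--                 counter = 2
--             feed_word(elem)
--     return ans
-- ===== Notes on version B (the rewrite author's own statement) =====
-- stated objective: alternative
-- what changed: B fuses A's two passes into one loop with O(1) extra state (pair buffer + last word), emitting output directly instead of materializing and re-scanning the intermediate token stream.
import Mathlib
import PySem

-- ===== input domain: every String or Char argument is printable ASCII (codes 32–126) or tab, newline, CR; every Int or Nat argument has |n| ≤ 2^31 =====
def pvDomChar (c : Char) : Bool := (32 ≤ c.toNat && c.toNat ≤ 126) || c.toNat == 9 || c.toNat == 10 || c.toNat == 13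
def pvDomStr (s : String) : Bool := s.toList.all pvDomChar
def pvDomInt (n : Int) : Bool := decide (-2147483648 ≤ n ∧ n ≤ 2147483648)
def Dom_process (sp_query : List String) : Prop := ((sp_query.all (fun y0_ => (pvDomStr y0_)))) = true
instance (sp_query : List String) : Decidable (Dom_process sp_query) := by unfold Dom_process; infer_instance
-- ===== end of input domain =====

-- B fuses A's two passes into one loop with O(1) extra state, emitting output directly
-- instead of materializing and re-scanning the intermediate token stream (objective: alternative).

-- ===== PORT A =====
-- first loop body of A: state (res, counter)
def pvStep1 (st : List String × Int) (elem : String) : List String × Int :=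
  let counter := if elem ≠ "AND" ∧ elem ≠ "OR" ∧ elem ≠ "NOT" ∧ elem ≠ "(" ∧ elem ≠ ")"
                 then st.2 + 1 else 0
  if counter = 3 then
    let res1 := st.1 ++ ["AND"]
    -- res[len(res) - 2]: always in range here (counter = 3 guarantees ≥ 2 prior appends),
    -- so pyGetD with a dummy default is exact
    let res2 := res1 ++ [PySem.List.pyGetD res1 ((res1.length : Int) - 2) ""]
    (res2 ++ [elem], 2)
  else (st.1 ++ [elem], counter)

-- second loop body of A: state (ans, pair)
def pvStep2 (st : List String × String) (elem : String) : List String × String :=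
  if elem = "AND" ∨ elem = "OR" ∨ elem = "NOT" ∨ elem = "(" ∨ elem = ")" then
    (st.1 ++ [elem], st.2)
  else if st.2 ≠ "" then (st.1 ++ [st.2 ++ elem], "")
  else (st.1, elem ++ " ")

def process (sp_query : List String) : List String :=
  let r := (PySem.List.pyRange 0 (PySem.List.len sp_query) 1).foldl
             (fun st i => pvStep1 st (PySem.List.pyGetD sp_query i "")) ([], 0)
  (r.1.foldl pvStep2 ([], "")).1

-- ===== PORT B =====
def pvIsOp (s : String) : Bool := s == "AND" || s == "OR" || s == "NOT" || s == "(" || s == ")"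

-- feed_word: state (ans, pair, last)
def pvFeedWord (st : List String × String × String) (w : String) : List String × String × String :=
  if st.2.1 ≠ "" then (st.1 ++ [st.2.1 ++ w], "", w) else (st.1, w ++ " ", w)

-- B's fused loop body: state (ans, pair, counter, last)
def pvStepB (st : List String × String × Int × String) (elem : String) :
    List String × String × Int × String :=
  if pvIsOp elem then (st.1 ++ [elem], st.2.1, 0, st.2.2.2)
  else
    let counter := st.2.2.1 + 1
    if counter = 3 then
      let s1 := pvFeedWord (st.1 ++ ["AND"], st.2.1, st.2.2.2) st.2.2.2
      let s2 := pvFeedWord s1 elem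
      (s2.1, s2.2.1, 2, s2.2.2)
    else
      let s := pvFeedWord (st.1, st.2.1, st.2.2.2) elem
      (s.1, s.2.1, counter, s.2.2)

def process_alt (sp_query : List String) : List String :=
  (sp_query.foldl pvStepB ([], "", 0, "")).1

-- ===== PRECONDITION & SPEC =====
def Spec_process (sp_query : List String) (out : List String) : Prop := out = process_alt sp_query
instance (sp_query : List String) (out : List String) : Decidable (Spec_process sp_query out) := by unfold Spec_process; infer_instance

-- ===== CLAIM (what is proved, stated in full; the proofs are below) =====
def Claim_equal_process : Prop := ∀ (sp_query : List String), Dom_process sp_query → Spec_process sp_query (process sp_query)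

-- ===== LEMMAS AND PROOFS =====

-- operator test of B agrees with the propositional condition in A
theorem pvOp_iff (e : String) : pvIsOp e = true ↔ (e = "AND" ∨ e = "OR" ∨ e = "NOT" ∨ e = "(" ∨ e = ")") := by
  simp [pvIsOp]; tauto

-- one fused step of B simulates one step of A's first loop, re-scanned by A's second loop
theorem pvStep_sim (res : List String) (counter : Int) (ans : List String) (pair last : String)
    (h2 : (ans, pair) = res.foldl pvStep2 ([], ""))
    (h3 : counter ≠ 0 → (∃ r, res = r ++ [last]) ∧ pvIsOp last = false) (e : String) :
    ∃ L, pvStepB (ans, pair, counter, last) e =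
        (((pvStep1 (res, counter) e).1.foldl pvStep2 ([], "")).1,
         ((pvStep1 (res, counter) e).1.foldl pvStep2 ([], "")).2,
         (pvStep1 (res, counter) e).2, L) ∧
      ((pvStep1 (res, counter) e).2 ≠ 0 →
        (∃ r, (pvStep1 (res, counter) e).1 = r ++ [L]) ∧ pvIsOp L = false) := by
  by_cases hop : pvIsOp e = true
  case pos =>
    have hcond : ¬ (e ≠ "AND" ∧ e ≠ "OR" ∧ e ≠ "NOT" ∧ e ≠ "(" ∧ e ≠ ")") := by
      have := (pvOp_iff e).mp hop; tauto
    refine ⟨last, ?_, ?_⟩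
    · simp [pvStep1, pvStepB, hop, hcond, List.foldl_append, pvStep2, ← h2, (pvOp_iff e).mp hop]
    · intro h; simp [pvStep1, hcond] at h
  case neg =>
    have hcond : e ≠ "AND" ∧ e ≠ "OR" ∧ e ≠ "NOT" ∧ e ≠ "(" ∧ e ≠ ")" := by
      have := (pvOp_iff e); tauto
    have hopf : pvIsOp e = false := by simp at hop; exact hop
    by_cases h3c : counter + 1 = 3
    case pos =>
      have hc2 : counter = 2 := by omega
      obtain ⟨⟨r, hr⟩, hlop⟩ := h3 (by omega)
      have hlw : ¬ (last = "AND" ∨ last = "OR" ∨ last = "NOT" ∨ last = "(" ∨ last = ")") := by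
        intro hc; rw [← pvOp_iff] at hc; simp [hc] at hlop
      -- the res[len(res)-2] back-reference retrieves exactly `last`
      have hget : PySem.List.pyGetD (res ++ ["AND"]) ((res.length : Int) + 1 - 2) "" = last := by
        subst hr
        have hlen : (((r ++ [last]).length : Int) + 1 - 2) = ((r.length : Nat) : Int) := by simp; omega
        rw [hlen, PySem.List.pyGetD_natCast]
        simp [List.getD]
      refine ⟨e, ?_, ?_⟩
      · by_cases hp : pair = "" <;>
          simp [pvStep1, pvStepB, hopf, hcond, hc2, hget, List.foldl_append, ← h2, pvStep2,
            pvFeedWord, hlw, hp]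
      · intro _
        refine ⟨⟨res ++ ["AND"] ++ [PySem.List.pyGetD (res ++ ["AND"]) (((res ++ ["AND"]).length : Int) - 2) ""], ?_⟩, hopf⟩
        simp [pvStep1, hcond, hc2]
    case neg =>
      refine ⟨e, ?_, ?_⟩
      · by_cases hp : pair = "" <;>
          simp [pvStep1, pvStepB, hopf, hcond, h3c, List.foldl_append, ← h2, pvStep2,
            pvFeedWord, hp]
      · intro _
        exact ⟨⟨res, by simp [pvStep1, hcond, h3c]⟩, hopf⟩

-- B's fold tracks the image of A's fold under the second pass
theorem pvFold_sim (l : List String) : ∀ (res : List String) (counter : Int)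
    (ans : List String) (pair last : String),
    (ans, pair) = res.foldl pvStep2 ([], "") →
    (counter ≠ 0 → (∃ r, res = r ++ [last]) ∧ pvIsOp last = false) →
    (l.foldl pvStepB (ans, pair, counter, last)).1 =
      ((l.foldl pvStep1 (res, counter)).1.foldl pvStep2 ([], "")).1 := by
  induction l with
  | nil => intro res counter ans pair last h2 h3; simpa [List.foldl] using congrArg Prod.fst h2
  | cons e l ih =>
    intro res counter ans pair last h2 h3
    obtain ⟨L, hstep, hlast⟩ := pvStep_sim res counter ans pair last h2 h3 e
    simp only [List.foldl_cons, hstep]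
    exact ih _ _ _ _ _ rfl hlast

theorem process_spec : Claim_equal_process := by
  intro q _
  unfold Spec_process process process_alt
  rw [PySem.List.foldl_pyRange_zero_pyGetD]
  exact (pvFold_sim q [] 0 [] "" "" rfl (fun h => absurd rfl h)).symm
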